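-- pv_equiv track=rewrite | github.com/vnpy/vnag | vnag/segmenter.py | pack_lines
-- ===== SOURCE A (Python) =====
-- def pack_lines(lines: list[str], chunk_size: int) -> list[str]:
--     """
--     将代码行列表打包成不超过指定大小的文本块。
--
--     该函数模拟将代码行一个个放入箱子（文本块）的过程，以尽可能填满每个箱子。
--
--     参数:
--         lines: 待打包的字符串代码行列表。
--         chunk_size: 每个文本块的最大长度。
--
--     返回:
--         一个由打包好的文本块字符串组成的列表。
--
--     注意:
--         - 代码行之间使用 `\n` 连接，拼接长度会计入总长度。
--         - 该函数不处理单行超长的情况，单个超长行会自成一个块。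
--     """
--     chunks: list[str] = []
--     buffer: list[str] = []
--     buffer_len: int = 0
--
--     for line in lines:
--         separator_len: int = 1 if buffer else 0
--         line_len: int = len(line)
--
--         # 检查将当前行加入缓冲区后是否会超长
--         if buffer_len + line_len + separator_len <= chunk_size:
--             # 未超长：加入缓冲区
--             buffer.append(line)
--             buffer_len += line_len + separator_len
--             continue
--
--         # 已超长：先将当前缓冲区打包成块
--         if buffer:
--             assembled_chunk: str = "\n".join(buffer).strip()
--             if assembled_chunk:
--                 chunks.append(assembled_chunk)
--
--         # 然后将当前行作为新缓冲区的开始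
--         buffer = [line]
--         buffer_len = line_len
--
--     # 清空最后一个缓冲区中剩余的内容
--     if buffer:
--         assembled_chunk = "\n".join(buffer).strip()
--         if assembled_chunk:
--             chunks.append(assembled_chunk)
--
--     return chunks
-- ===== SOURCE B (Python) =====
-- def pack_lines(lines: list[str], chunk_size: int) -> list[str]:
--     # Phase 1: compute maximal group boundaries by index (a group always
--     # takes at least one line, even if that line alone exceeds chunk_size).
--     joined: list[str] = []
--     i = 0
--     n = len(lines)
--     while i < n:
--         total = len(lines[i])
--         j = i + 1
--         while j < n and total + 1 + len(lines[j]) <= chunk_size: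
--             total += 1 + len(lines[j])
--             j += 1
--         joined.append("\n".join(lines[i:j]))
--         i = j
--     # Phase 2: strip each assembled group and drop the empty ones.
--     return [s for s in map(str.strip, joined) if s]
-- ===== Notes on version B (the rewrite author's own statement) =====
-- stated objective: alternative
-- what changed: Replaces A's single fold over a (chunks, buffer, buffer_len) state machine by a two-phase algorithm: an index-based nested-loop pass that finds maximal group boundaries and joins each slice, then a comprehension that strips and filters the assembled groups.
import Mathlib
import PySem

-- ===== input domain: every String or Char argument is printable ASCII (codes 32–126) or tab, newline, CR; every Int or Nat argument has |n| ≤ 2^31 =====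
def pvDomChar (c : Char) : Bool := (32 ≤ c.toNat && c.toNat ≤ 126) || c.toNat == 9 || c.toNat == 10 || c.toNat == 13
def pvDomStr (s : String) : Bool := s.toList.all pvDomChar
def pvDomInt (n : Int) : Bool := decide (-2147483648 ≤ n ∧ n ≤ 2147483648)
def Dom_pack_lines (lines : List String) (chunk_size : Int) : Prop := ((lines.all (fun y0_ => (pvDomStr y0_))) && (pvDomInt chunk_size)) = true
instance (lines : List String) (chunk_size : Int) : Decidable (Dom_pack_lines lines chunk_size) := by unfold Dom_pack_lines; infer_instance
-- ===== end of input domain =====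

-- B replaces A's one-pass (chunks, buffer, buffer_len) state machine by an index-based
-- boundary-finding pass followed by a strip/filter pass (alternative decomposition, same cost).


-- ===== PORT A =====
-- loop body of A's `for line in lines` (state = (chunks, buffer, buffer_len))
def pvStepA (chunk_size : Int) (st : List String × List String × Int) (line : String) :
    List String × List String × Int :=
  let (chunks, buffer, buffer_len) := st
  let separator_len : Int := if buffer.isEmpty then 0 else 1
  let line_len : Int := PySem.Str.len line
  if buffer_len + line_len + separator_len ≤ chunk_size then
    (chunks, buffer ++ [line], buffer_len + line_len + separator_len)
  else
    let chunks :=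
      if buffer.isEmpty then chunks
      else
        let assembled_chunk := PySem.Str.strip (PySem.Str.join "\n" buffer)
        if assembled_chunk = "" then chunks else chunks ++ [assembled_chunk]
    (chunks, [line], line_len)

-- final `if buffer: …` flush after the loop
def pvFlushA (st : List String × List String × Int) : List String :=
  let (chunks, buffer, _) := st
  if buffer.isEmpty then chunks
  else
    let assembled_chunk := PySem.Str.strip (PySem.Str.join "\n" buffer)
    if assembled_chunk = "" then chunks else chunks ++ [assembled_chunk]

def pack_lines (lines : List String) (chunk_size : Int) : List String :=
  pvFlushA (lines.foldl (pvStepA chunk_size) ([], [], 0))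

-- ===== PORT B =====
-- inner while loop of B: extend the group while the next line still fits.
-- `lines[j]` is read with getD: j < len(lines) is in the guard, so no IndexError (exact).
def pvInnerB (lines : List String) (chunk_size : Int) (j : Nat) (total : Int) : Nat × Int :=
  if h : j < lines.length ∧ total + 1 + PySem.Str.len (lines.getD j "") ≤ chunk_size then
    pvInnerB lines chunk_size (j + 1) (total + 1 + PySem.Str.len (lines.getD j ""))
  else (j, total)
termination_by lines.length - j
decreasing_by omega

-- the loop index never moves backwards (needed for the outer loop's termination)
theorem pvInnerB_ge (lines : List String) (chunk_size : Int) (j : Nat) (total : Int) :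
    j ≤ (pvInnerB lines chunk_size j total).1 := by
  rw [pvInnerB]
  split
  · exact Nat.le_trans (Nat.le_succ j) (pvInnerB_ge lines chunk_size (j + 1) _)
  · exact Nat.le_refl j
termination_by lines.length - j
decreasing_by omega

-- outer while loop of B: one joined string per maximal group
def pvOuterB (lines : List String) (chunk_size : Int) (i : Nat) : List String :=
  if h : i < lines.length then
    let total := PySem.Str.len (lines.getD i "")
    let j := (pvInnerB lines chunk_size (i + 1) total).1
    PySem.Str.join "\n" (PySem.List.slice lines (some (i : Int)) (some (j : Int)))
      :: pvOuterB lines chunk_size j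
  else []
termination_by lines.length - i
decreasing_by
  have := pvInnerB_ge lines chunk_size (i + 1) (PySem.Str.len (lines.getD i ""))
  omega

def pack_lines_alt (lines : List String) (chunk_size : Int) : List String :=
  ((pvOuterB lines chunk_size 0).map PySem.Str.strip).filter (fun s => !(s == ""))

-- ===== PRECONDITION & SPEC =====
def Spec_pack_lines (lines : List String) (chunk_size : Int) (out : List String) : Prop := out = pack_lines_alt lines chunk_size
instance (lines : List String) (chunk_size : Int) (out : List String) : Decidable (Spec_pack_lines lines chunk_size out) := by unfold Spec_pack_lines; infer_instance

-- ===== CLAIM (what is proved, stated in full; the proofs are below) =====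
def Claim_equal_pack_lines : Prop := ∀ (lines : List String) (chunk_size : Int), Dom_pack_lines lines chunk_size → Spec_pack_lines lines chunk_size (pack_lines lines chunk_size)

-- ===== LEMMAS AND PROOFS =====

-- Common specification: the list of greedy groups (each group a list of lines).
def pvGrp (chunk_size : Int) (g : List String) (t : Int) : List String → List (List String)
  | [] => [g]
  | l :: rest =>
      if t + PySem.Str.len l + 1 ≤ chunk_size then
        pvGrp chunk_size (g ++ [l]) (t + PySem.Str.len l + 1) rest
      else
        g :: pvGrp chunk_size [l] (PySem.Str.len l) rest

def pvGroups (chunk_size : Int) : List String → List (List String)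
  | [] => []
  | l :: rest => pvGrp chunk_size [l] (PySem.Str.len l) rest

def pvEmit (g : List String) : Option String :=
  let s := PySem.Str.strip (PySem.Str.join "\n" g)
  if s = "" then none else some s

theorem lemA (chunk_size : Int) (rest : List String) :
    ∀ (chunks g : List String) (t : Int), g ≠ [] →
    pvFlushA (rest.foldl (pvStepA chunk_size) (chunks, g, t))
      = chunks ++ (pvGrp chunk_size g t rest).filterMap pvEmit := by
  induction rest with
  | nil =>
      intro chunks g t hg
      have hne : g.isEmpty = false := by simp [hg]
      simp only [List.foldl_nil, pvFlushA, pvGrp, List.filterMap_cons, List.filterMap_nil,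
        pvEmit, hne, Bool.false_eq_true, if_false]
      split <;> simp
  | cons l rest ih =>
      intro chunks g t hg
      have hne : g.isEmpty = false := by simp [hg]
      simp only [List.foldl_cons, pvStepA, hne, Bool.false_eq_true, if_false, pvGrp]
      by_cases hc : t + PySem.Str.len l + 1 ≤ chunk_size
      · rw [if_pos hc, if_pos hc]
        exact ih chunks (g ++ [l]) _ (by simp)
      · rw [if_neg hc, if_neg hc]
        rw [ih _ [l] _ (by simp)]
        simp only [List.filterMap_cons]
        cases hE : pvEmit g with
        | none =>
            simp only [pvEmit] at hE
            split at hE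
            · simp_all
            · simp_all
        | some s =>
            simp only [pvEmit] at hE
            split at hE
            · simp_all
            · simp_all

theorem lemInner (lines : List String) (chunk_size : Int) :
    ∀ (j : Nat) (t : Int) (pre : List String), j ≤ lines.length →
    pvGrp chunk_size pre t (lines.drop j)
      = (pre ++ (lines.drop j).take ((pvInnerB lines chunk_size j t).1 - j))
        :: pvGroups chunk_size (lines.drop (pvInnerB lines chunk_size j t).1) := by
  intro j t pre hj
  rw [pvInnerB]
  split
  · rename_i h
    obtain ⟨hjn, hfit⟩ := h
    have hget : lines.getD j "" = lines[j] := by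
      simp [List.getD, List.getElem?_eq_getElem hjn]
    simp only [hget]
    rw [hget] at hfit
    have hdrop : lines.drop j = lines[j] :: lines.drop (j + 1) :=
      List.drop_eq_getElem_cons hjn
    rw [hdrop]
    simp only [pvGrp]
    rw [if_pos (by omega : t + PySem.Str.len lines[j] + 1 ≤ chunk_size)]
    rw [show t + PySem.Str.len lines[j] + 1 = t + 1 + PySem.Str.len lines[j] from by ring]
    rw [lemInner lines chunk_size (j + 1) (t + 1 + PySem.Str.len lines[j]) (pre ++ [lines[j]]) (by omega)]
    have hge := pvInnerB_ge lines chunk_size (j + 1) (t + 1 + PySem.Str.len lines[j])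
    set j' := (pvInnerB lines chunk_size (j + 1) (t + 1 + PySem.Str.len lines[j])).1 with hj'
    have htake : (lines[j] :: lines.drop (j + 1)).take (j' - j)
        = lines[j] :: (lines.drop (j + 1)).take (j' - (j + 1)) := by
      rw [show j' - j = (j' - (j + 1)) + 1 from by omega, List.take_succ_cons]
    rw [htake]
    simp
  · rename_i h
    simp only [Nat.sub_self, List.take_zero, List.append_nil]
    by_cases hjn : j < lines.length
    · have hget : lines.getD j "" = lines[j] := by
        simp [List.getD, List.getElem?_eq_getElem hjn]
      have hfit : ¬ t + 1 + PySem.Str.len lines[j] ≤ chunk_size := by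
        intro hc; exact h ⟨hjn, by rw [hget]; exact hc⟩
      have hdrop : lines.drop j = lines[j] :: lines.drop (j + 1) :=
        List.drop_eq_getElem_cons hjn
      rw [hdrop]
      simp only [pvGrp, pvGroups]
      rw [if_neg (by omega)]
    · have : lines.drop j = [] := List.drop_eq_nil_of_le (by omega)
      rw [this]
      simp [pvGrp, pvGroups]
termination_by j => lines.length - j
decreasing_by omega

theorem pvInnerB_le (lines : List String) (chunk_size : Int) (j : Nat) (t : Int)
    (hj : j ≤ lines.length) : (pvInnerB lines chunk_size j t).1 ≤ lines.length := by
  rw [pvInnerB]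
  split
  · rename_i h
    exact pvInnerB_le lines chunk_size (j + 1) _ (by omega)
  · exact hj
termination_by lines.length - j
decreasing_by omega

theorem lemOuter (lines : List String) (chunk_size : Int) :
    ∀ (i : Nat), i ≤ lines.length →
    pvOuterB lines chunk_size i
      = (pvGroups chunk_size (lines.drop i)).map (PySem.Str.join "\n") := by
  intro i hi
  rw [pvOuterB]
  split
  · rename_i hin
    have hget : lines.getD i "" = lines[i] := by
      simp [List.getD, List.getElem?_eq_getElem hin]
    simp only [hget]
    have hdrop : lines.drop i = lines[i] :: lines.drop (i + 1) :=
      List.drop_eq_getElem_cons hin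
    set j := (pvInnerB lines chunk_size (i + 1) (PySem.Str.len lines[i])).1 with hjdef
    have hge : i + 1 ≤ j := pvInnerB_ge lines chunk_size (i + 1) _
    have hle : j ≤ lines.length := pvInnerB_le lines chunk_size (i + 1) _ (by omega)
    rw [hdrop]
    simp only [pvGroups]
    have hin' := lemInner lines chunk_size (i + 1) (PySem.Str.len lines[i]) [lines[i]] (by omega)
    rw [← hjdef] at hin'
    rw [hin']
    simp only [List.map_cons]
    rw [lemOuter lines chunk_size j hle]
    have hslice : PySem.List.slice lines (some (i : Int)) (some (j : Int))
        = (lines.drop i).take (j - i) := by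
      rw [PySem.List.slice_of_nonneg] <;> simp <;> omega
    have htake : (lines.drop i).take (j - i)
        = lines[i] :: (lines.drop (i + 1)).take (j - (i + 1)) := by
      rw [hdrop]
      rw [show j - i = (j - (i + 1)) + 1 from by omega, List.take_succ_cons]
    rw [hslice, htake]
    simp
  · rename_i hin
    have : lines.drop i = [] := List.drop_eq_nil_of_le (by omega)
    rw [this]
    simp [pvGroups]
termination_by i => lines.length - i
decreasing_by omega

theorem filter_map_emit (gs : List (List String)) :
    ((gs.map (PySem.Str.join "\n")).map PySem.Str.strip).filter (fun s => !(s == ""))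
      = gs.filterMap pvEmit := by
  induction gs with
  | nil => rfl
  | cons g gs ih =>
      simp only [List.map_cons, List.filter_cons, List.filterMap_cons]
      by_cases h : PySem.Str.strip (PySem.Str.join "\n" g) = ""
      · simp only [pvEmit, h]
        simpa [h] using ih
      · simp only [pvEmit, if_neg h]
        have : (!(PySem.Str.strip (PySem.Str.join "\n" g) == "")) = true := by simp [h]
        rw [this]
        simpa using ih

-- with an empty buffer both branches of A's first loop iteration produce the state ([], [line], len line)
theorem pvStepA_empty (chunk_size : Int) (chunks : List String) (l : String) :
    pvStepA chunk_size (chunks, [], 0) l = (chunks, [l], PySem.Str.len l) := by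
  simp only [pvStepA, List.isEmpty_nil]
  split <;> simp_all

theorem packA_eq_groups (lines : List String) (chunk_size : Int) :
    pack_lines lines chunk_size = (pvGroups chunk_size lines).filterMap pvEmit := by
  cases lines with
  | nil => rfl
  | cons l rest =>
      unfold pack_lines
      rw [List.foldl_cons, pvStepA_empty]
      rw [lemA chunk_size rest [] [l] (PySem.Str.len l) (by simp)]
      simp [pvGroups]

theorem packB_eq_groups (lines : List String) (chunk_size : Int) :
    pack_lines_alt lines chunk_size = (pvGroups chunk_size lines).filterMap pvEmit := by
  unfold pack_lines_alt
  rw [lemOuter lines chunk_size 0 (by omega), List.drop_zero, filter_map_emit]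

-- ===== VERDICT (by name: the statement is the Claim_ definition above) =====
theorem pack_lines_spec : Claim_equal_pack_lines := by
  intro lines chunk_size _
  unfold Spec_pack_lines
  rw [packA_eq_groups, packB_eq_groups]
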